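-- pv_equiv track=rewrite | github.com/v-pun215/zcoc | zco2024/vegetables_ai.py | one_step_best
-- ===== SOURCE A (Python) =====
-- def total(A, B):
--     """Return sum_i A[i]*B[i] as integer."""
--     s = 0
--     for a, b in zip(A, B):
--         s += a * b
--     return s
--
-- def one_step_best(A, B):
--     """
--     Consider all valid single-unit operations:
--       - reduce A[i] by 1 if A[i] > 0
--       - reduce B[i] by 1 if B[i] > 0
--     Return a tuple (best_total, best_i, best_type, newA, newB)
--     where best_type is 'A' or 'B'. If no operation possible (all zero), return None.
--     """
--     n = len(A)
--     cur_total = total(A, B)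
--     best_total = cur_total
--     best_i = -1
--     best_type = None
--     bestA = None
--     bestB = None
--
--     # Try every possible single decrement
--     for i in range(n):
--         a = A[i]
--         b = B[i]
--         if a > 0:
--             # simulate reducing A[i]
--             newA = A.copy()
--             newA[i] = a - 1
--             t = total(newA, B)
--             if t < best_total:
--                 best_total = t
--                 best_i = i
--                 best_type = 'A'
--                 bestA = newA
--                 bestB = B.copy()
--         if b > 0:
--             # simulate reducing B[i]
--             newB = B.copy()
--             newB[i] = b - 1
--             t = total(A, newB)
--             if t < best_total:
--                 best_total = t
--                 best_i = i
--                 best_type = 'B'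
--                 bestA = A.copy()
--                 bestB = newB
--
--     if best_type is None:
--         return None  # no valid operation
--     return best_total, best_i, best_type, bestA, bestB
-- ===== SOURCE B (Python) =====
-- def one_step_best(A, B):
--     # One pass: a decrement of A[i] lowers the dot product by B[i], of B[i] by A[i];
--     # pick the first operation (index ascending, 'A' before 'B') with the strictly largest positive decrease.
--     cur = 0
--     for a, b in zip(A, B):
--         cur += a * b
--     best_d = 0
--     best = None
--     for i, (a, b) in enumerate(zip(A, B)):
--         if a > 0 and b > best_d:
--             best_d = b
--             best = (i, 'A')
--         if b > 0 and a > best_d: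
--             best_d = a
--             best = (i, 'B')
--     if best is None:
--         return None
--     i, kind = best
--     if kind == 'A':
--         newA = A.copy()
--         newA[i] -= 1
--         return cur - best_d, i, 'A', newA, B.copy()
--     else:
--         newB = B.copy()
--         newB[i] -= 1
--         return cur - best_d, i, 'B', A.copy(), newB
-- ===== Notes on version B (the rewrite author's own statement) =====
-- stated objective: faster
-- what changed: Instead of re-summing the whole dot product for every candidate decrement (nested loops), B computes the total once and in a single pass picks the operation with the largest positive decrease (B[i] for an A-decrement, A[i] for a B-decrement), then builds the result lists once at the end.
import Mathlib
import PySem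

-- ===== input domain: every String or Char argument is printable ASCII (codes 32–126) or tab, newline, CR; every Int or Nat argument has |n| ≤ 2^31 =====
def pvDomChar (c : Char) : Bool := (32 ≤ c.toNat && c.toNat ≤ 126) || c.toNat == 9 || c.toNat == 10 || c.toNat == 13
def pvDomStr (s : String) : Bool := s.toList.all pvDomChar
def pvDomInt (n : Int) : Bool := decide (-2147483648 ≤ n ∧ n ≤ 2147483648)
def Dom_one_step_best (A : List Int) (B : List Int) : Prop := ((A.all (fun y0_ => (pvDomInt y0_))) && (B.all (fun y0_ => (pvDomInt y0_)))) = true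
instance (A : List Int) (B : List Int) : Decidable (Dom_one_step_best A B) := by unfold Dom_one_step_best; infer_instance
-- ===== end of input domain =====

-- B replaces A's "re-sum the whole dot product for every candidate decrement" search (nested loops)
-- by one pass over the precomputed total; the equivalence is about the return value (neither mutates).

-- ===== PORT A =====
-- total(A, B): Python's zip truncates to the shorter list
def pyTotal (A B : List Int) : Int :=
  (A.zip B).foldl (fun s p => s + p.1 * p.2) 0

-- body of A's `for i in range(n)` loop; state = (best_total, best_i, best_type, bestA, bestB)
def osbBodyA (A B : List Int)
    (st : Int × Int × Option String × Option (List Int) × Option (List Int)) (i : Int) :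
    Int × Int × Option String × Option (List Int) × Option (List Int) :=
  let a := PySem.List.pyGetD A i 0   -- A[i]; always in range for i ∈ range(len(A))
  let b := PySem.List.pyGetD B i 0   -- B[i]; Python raises IndexError iff len(B) < len(A): excluded by Pre_
  let st1 :=
    if 0 < a then
      let newA := PySem.List.pySetD A i (a - 1)   -- newA = A.copy(); newA[i] = a - 1
      let t := pyTotal newA B
      if t < st.1 then (t, i, some "A", some newA, some B) else st
    else st
  if 0 < b then
    let newB := PySem.List.pySetD B i (b - 1)     -- newB = B.copy(); newB[i] = b - 1
    let t := pyTotal A newB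
    if t < st1.1 then (t, i, some "B", some A, some newB) else st1
  else st1

def one_step_best (A : List Int) (B : List Int) : Option (Int × Int × String × List Int × List Int) :=
  let n : Int := PySem.List.len A
  let cur := pyTotal A B
  let st := (PySem.List.pyRange 0 n 1).foldl (osbBodyA A B) (cur, -1, none, none, none)
  match st.2.2.1 with
  | none => none   -- best_type is None: no valid operation
  | some ty => some (st.1, st.2.1, ty, (st.2.2.2.1).getD [], (st.2.2.2.2).getD [])

-- ===== PORT B =====
-- body of B's single `for i, (a, b) in enumerate(zip(A, B))` pass; state = (best_d, best)
def osbBodyB (st : Int × Option (Int × String)) (p : Int × Int × Int) :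
    Int × Option (Int × String) :=
  let st1 := if 0 < p.2.1 ∧ st.1 < p.2.2 then (p.2.2, some (p.1, "A")) else st
  if 0 < p.2.2 ∧ st1.1 < p.2.1 then (p.2.1, some (p.1, "B")) else st1

def one_step_best_alt (A : List Int) (B : List Int) : Option (Int × Int × String × List Int × List Int) :=
  let cur := (A.zip B).foldl (fun s p => s + p.1 * p.2) 0
  let st := (PySem.List.enumerate (A.zip B)).foldl osbBodyB (0, none)
  match st.2 with
  | none => none
  | some (i, kind) =>
    if kind = "A" then
      some (cur - st.1, i, "A", PySem.List.pySetD A i (PySem.List.pyGetD A i 0 - 1), B)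
    else
      some (cur - st.1, i, "B", A, PySem.List.pySetD B i (PySem.List.pyGetD B i 0 - 1))

-- ===== PRECONDITION & SPEC =====
-- A reads B[i] for every i < len(A), so it raises IndexError exactly when len(B) < len(A).
def Pre_one_step_best (A : List Int) (B : List Int) : Prop := A.length ≤ B.length
instance (A : List Int) (B : List Int) : Decidable (Pre_one_step_best A B) := by unfold Pre_one_step_best; infer_instance
def pvWitness_one_step_best : List Int × List Int := ([1, 2], [3, 0, 5])

def Spec_one_step_best (A : List Int) (B : List Int) (out : Option (Int × Int × String × List Int × List Int)) : Prop := out = one_step_best_alt A B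
instance (A : List Int) (B : List Int) (out : Option (Int × Int × String × List Int × List Int)) : Decidable (Spec_one_step_best A B out) := by unfold Spec_one_step_best; infer_instance

-- ===== CLAIM (what is proved, stated in full; the proofs are below) =====
def Claim_equal_one_step_best : Prop := ∀ (A : List Int) (B : List Int), Dom_one_step_best A B → Pre_one_step_best A B → Spec_one_step_best A B (one_step_best A B)

-- ===== LEMMAS AND PROOFS =====

lemma pyTotal_eq_sum (A B : List Int) :
    pyTotal A B = ((A.zip B).map (fun p => p.1 * p.2)).sum := by
  simpa using PySem.List.foldl_add (l := A.zip B) (g := fun p => p.1 * p.2) (a := 0)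

-- decrementing A[j] changes the (zip-truncated) dot product by the stated amount
lemma pyTotal_set_left : ∀ (A B : List Int) (j : Nat) (v : Int), j < A.length → j < B.length →
    pyTotal (A.set j v) B = pyTotal A B + (v - A.getD j 0) * B.getD j 0
  | a :: A, b :: B, 0, v, _, _ => by
    simp [pyTotal_eq_sum]; ring
  | a :: A, b :: B, j + 1, v, hA, hB => by
    have ih := pyTotal_set_left A B j v (by simpa using hA) (by simpa using hB)
    rw [show ((a :: A).set (j + 1) v) = a :: A.set j v from rfl]
    simp only [pyTotal_eq_sum, List.zip_cons_cons, List.map_cons, List.sum_cons,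
      List.getD_cons_succ] at ih ⊢
    linarith

lemma pyTotal_set_right : ∀ (A B : List Int) (j : Nat) (v : Int), j < A.length → j < B.length →
    pyTotal A (B.set j v) = pyTotal A B + A.getD j 0 * (v - B.getD j 0)
  | a :: A, b :: B, 0, v, _, _ => by
    simp [pyTotal_eq_sum]; ring
  | a :: A, b :: B, j + 1, v, hA, hB => by
    have ih := pyTotal_set_right A B j v (by simpa using hA) (by simpa using hB)
    rw [show ((b :: B).set (j + 1) v) = b :: B.set j v from rfl]
    simp only [pyTotal_eq_sum, List.zip_cons_cons, List.map_cons, List.sum_cons,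
      List.getD_cons_succ] at ih ⊢
    linarith

-- the coupling invariant between A's 5-field loop state and B's 2-field loop state
def osbInv (A B : List Int)
    (s : Int × Int × Option String × Option (List Int) × Option (List Int))
    (t : Int × Option (Int × String)) : Prop :=
  s.1 = pyTotal A B - t.1 ∧
  ((t.2 = none ∧ t.1 = 0 ∧ s.2.2.1 = none) ∨
   (∃ j : Nat, j < A.length ∧
     ((t.2 = some ((j : Int), "A") ∧ s.2.1 = (j : Int) ∧ s.2.2.1 = some "A" ∧
       s.2.2.2.1 = some (A.set j (A.getD j 0 - 1)) ∧ s.2.2.2.2 = some B) ∨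
      (t.2 = some ((j : Int), "B") ∧ s.2.1 = (j : Int) ∧ s.2.2.1 = some "B" ∧
       s.2.2.2.1 = some A ∧ s.2.2.2.2 = some (B.set j (B.getD j 0 - 1))))))

lemma osbInv_step (A B : List Int) (hAB : A.length ≤ B.length) (j : Nat) (hj : j < A.length)
    (s t) (h : osbInv A B s t) :
    osbInv A B (osbBodyA A B s (j : Int)) (osbBodyB t ((j : Int), A.getD j 0, B.getD j 0)) := by
  obtain ⟨h1, h2⟩ := h
  have hjB : j < B.length := lt_of_lt_of_le hj hAB
  have htA : pyTotal (A.set j (A.getD j 0 - 1)) B = pyTotal A B - B.getD j 0 := by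
    rw [pyTotal_set_left A B j _ hj hjB]; ring
  have htB : pyTotal A (B.set j (B.getD j 0 - 1)) = pyTotal A B - A.getD j 0 := by
    rw [pyTotal_set_right A B j _ hj hjB]; ring
  simp only [osbBodyA, osbBodyB, PySem.List.pyGetD_natCast, PySem.List.pySetD_natCast, htA, htB]
  split_ifs <;>
    first
      | (exact ⟨by omega, Or.inr ⟨j, hj, Or.inl ⟨rfl, rfl, rfl, rfl, rfl⟩⟩⟩)
      | (exact ⟨by omega, Or.inr ⟨j, hj, Or.inr ⟨rfl, rfl, rfl, rfl, rfl⟩⟩⟩)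
      | (exact ⟨h1, h2⟩)
      | omega

lemma osbInv_fold (A B : List Int) (hAB : A.length ≤ B.length) :
    ∀ (l : List Nat), (∀ j ∈ l, j < A.length) → ∀ s t, osbInv A B s t →
      osbInv A B (l.foldl (fun s (j : Nat) => osbBodyA A B s (j : Int)) s)
        (l.foldl (fun t (j : Nat) => osbBodyB t ((j : Int), A.getD j 0, B.getD j 0)) t)
  | [], _, s, t, h => h
  | j :: l, hl, s, t, h => by
    exact osbInv_fold A B hAB l (fun x hx => hl x (List.mem_cons_of_mem _ hx)) _ _
      (osbInv_step A B hAB j (hl j (List.mem_cons_self)) s t h)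

lemma rangeA_eq (A : List Int) :
    PySem.List.pyRange 0 (PySem.List.len A) 1 = (List.range A.length).map (fun (k : Nat) => (k : Int)) := by
  rw [PySem.List.pyRange_one]
  simp

lemma enum_eq (A B : List Int) (hAB : A.length ≤ B.length) :
    PySem.List.enumerate (A.zip B) =
      (List.range A.length).map (fun (k : Nat) => ((k : Int), A.getD k 0, B.getD k 0)) := by
  apply List.ext_getElem
  · simp [PySem.List.length_enumerate]; omega
  · intro k h1 h2
    simp only [PySem.List.getElem_enumerate, List.getElem_map, List.getElem_range]
    simp [PySem.List.length_enumerate] at h1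
    have hk : k < A.length := by omega
    simp [List.getElem_zip, List.getD_eq_getElem?_getD, hk, (by omega : k < B.length)]

theorem osb_equal (A B : List Int) (hAB : A.length ≤ B.length) :
    one_step_best A B = one_step_best_alt A B := by
  have eA : (PySem.List.pyRange 0 (PySem.List.len A) 1).foldl (osbBodyA A B)
        (pyTotal A B, -1, none, none, none)
      = (List.range A.length).foldl (fun s (j : Nat) => osbBodyA A B s (j : Int))
        (pyTotal A B, -1, none, none, none) := by
    rw [rangeA_eq, List.foldl_map]
  have eB : (PySem.List.enumerate (A.zip B)).foldl osbBodyB ((0 : Int), (none : Option (Int × String)))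
      = (List.range A.length).foldl (fun t (j : Nat) => osbBodyB t ((j : Int), A.getD j 0, B.getD j 0))
        ((0 : Int), (none : Option (Int × String))) := by
    rw [enum_eq A B hAB, List.foldl_map]
  have h0 : osbInv A B (pyTotal A B, -1, none, none, none)
      ((0 : Int), (none : Option (Int × String))) := ⟨by ring, Or.inl ⟨rfl, rfl, rfl⟩⟩
  have hfold := osbInv_fold A B hAB (List.range A.length)
    (fun j hjm => List.mem_range.mp hjm) _ _ h0
  simp only [one_step_best, one_step_best_alt]
  rw [show (A.zip B).foldl (fun s p => s + p.1 * p.2) 0 = pyTotal A B from rfl, eA, eB]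
  obtain ⟨h1, h2⟩ := hfold
  rcases h2 with ⟨ht, ht0, hty⟩ | ⟨j, hj, hcase⟩
  · rw [ht, hty]
  · rcases hcase with ⟨ht, hi, hty, hA', hB'⟩ | ⟨ht, hi, hty, hA', hB'⟩ <;>
      rw [ht, hty] <;>
      simp [hi, hA', hB', h1, PySem.List.pySetD_natCast, PySem.List.pyGetD_natCast]

-- ===== VERDICT (by name: the statement is the Claim_ definition above) =====
theorem one_step_best_spec : Claim_equal_one_step_best := by
  intro A B _ hpre
  exact osb_equal A B hpre
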